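-- pv_equiv track=rewrite | github.com/Igor-Roberto-Alves/Grupo-6---Av2---Prog-2 | muro.py | pontos_ao_redor
-- ===== SOURCE A (Python) =====
-- def pontos_ao_redor(matriz, valor, raio=1):
--     pontos_encontrados = []
--     pontos_ao_redor = []
--
--     for i in range(len(matriz)):
--         for j in range(len(matriz[i])):
--             if matriz[i][j] in valor:
--                 pontos_encontrados.append((i, j))
--
--     for ponto in pontos_encontrados:
--         x, y = ponto
--         for dx in range(-raio, raio+1):
--             for dy in range(-raio, raio+1):
--                 nx, ny = x + dx, y + dy
--                 if 0 <= nx < len(matriz) and 0 <= ny < len(matriz[0]) and (nx != x or ny != y):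
--                     pontos_ao_redor.append((nx, ny))
--
--     n_pontos = []
--     for n in pontos_ao_redor:
--         if matriz[n[0]][n[1]] == 0:
--             n_pontos.append(n)
--
--     return n_pontos
-- ===== SOURCE B (Python) =====
-- def pontos_ao_redor(matriz, valor, raio=1):
--     linhas = len(matriz)
--     colunas = len(matriz[0]) if matriz else 0
--     # index built once: for each row, the ascending column positions of its zero cells
--     zeros = [[j for j, v in enumerate(linha) if j < colunas and v == 0]
--              for linha in matriz]
--     resultado = []
--     for i, linha in enumerate(matriz):
--         for j, v in enumerate(linha):
--             if v in valor:
--                 for nx in range(max(i - raio, 0), min(i + raio, linhas - 1) + 1):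
--                     for ny in zeros[nx]:
--                         if j - raio <= ny <= j + raio and (nx != i or ny != j):
--                             resultado.append((nx, ny))
--     return resultado
-- ===== Notes on version B (the rewrite author's own statement) =====
-- stated objective: faster
-- what changed: B precomputes a per-row index of zero-cell column positions once, then for each matching cell walks only the clamped in-bounds window rows and that row's zero-column list, instead of A's three staged passes (collect matches, enumerate every (2r+1)^2 offset with per-neighbour bounds checks into an intermediate list, then filter that list for zero cells).
import Mathlib
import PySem

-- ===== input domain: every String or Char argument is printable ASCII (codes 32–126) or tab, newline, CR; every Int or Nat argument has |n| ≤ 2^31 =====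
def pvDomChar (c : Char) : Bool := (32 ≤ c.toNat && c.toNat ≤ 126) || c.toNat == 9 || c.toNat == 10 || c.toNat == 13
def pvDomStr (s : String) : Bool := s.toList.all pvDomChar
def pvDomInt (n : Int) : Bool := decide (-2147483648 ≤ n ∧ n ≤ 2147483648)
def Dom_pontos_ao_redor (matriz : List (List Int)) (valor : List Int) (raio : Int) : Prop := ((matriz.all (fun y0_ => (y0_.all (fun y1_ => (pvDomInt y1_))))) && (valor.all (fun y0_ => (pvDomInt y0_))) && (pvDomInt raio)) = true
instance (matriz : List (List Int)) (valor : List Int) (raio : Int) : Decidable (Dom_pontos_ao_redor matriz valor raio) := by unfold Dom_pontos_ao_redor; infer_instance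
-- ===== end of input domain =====

-- B replaces A's three staged passes by a per-row index of zero-cell columns built once, walked and
-- window-filtered per matching cell; objective: alternative. Return value only; nothing is mutated.

-- ===== PORT A =====
-- matriz[i][j]; the default is never reached on inputs admitted by Pre_ (Pre_ excludes exactly the
-- ragged-matrix accesses on which the Python raises IndexError)
def pvCell (matriz : List (List Int)) (i j : Int) : Int :=
  PySem.List.pyGetD (PySem.List.pyGetD matriz i []) j 1

def pontos_ao_redor (matriz : List (List Int)) (valor : List Int) (raio : Int) : List (Int × Int) :=
  let pontos_encontrados : List (Int × Int) :=
    (PySem.List.pyRange 0 matriz.length 1).foldl (fun acc i =>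
      (PySem.List.pyRange 0 ((PySem.List.pyGetD matriz i []).length : Int) 1).foldl (fun acc2 j =>
        if pvCell matriz i j ∈ valor then acc2 ++ [(i, j)] else acc2) acc) []
  let pontos_ao_redor_l : List (Int × Int) :=
    pontos_encontrados.foldl (fun acc p =>
      (PySem.List.pyRange (-raio) (raio + 1) 1).foldl (fun acc2 dx =>
        (PySem.List.pyRange (-raio) (raio + 1) 1).foldl (fun acc3 dy =>
          if 0 ≤ p.1 + dx ∧ p.1 + dx < (matriz.length : Int) ∧ 0 ≤ p.2 + dy ∧
              p.2 + dy < ((PySem.List.pyGetD matriz 0 []).length : Int) ∧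
              (p.1 + dx ≠ p.1 ∨ p.2 + dy ≠ p.2)
          then acc3 ++ [(p.1 + dx, p.2 + dy)] else acc3) acc2) acc) []
  pontos_ao_redor_l.foldl (fun acc n =>
    if pvCell matriz n.1 n.2 = 0 then acc ++ [n] else acc) []

-- ===== PORT B =====
-- [j for j, v in enumerate(linha) if j < colunas and v == 0]
def pvZerosRow (colunas : Int) (linha : List Int) : List Int :=
  ((PySem.List.enumerate linha).filter (fun jv => decide (jv.1 < colunas ∧ jv.2 = 0))).map (fun jv => jv.1)

def pontos_ao_redor_alt (matriz : List (List Int)) (valor : List Int) (raio : Int) : List (Int × Int) :=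
  let linhas : Int := matriz.length
  let colunas : Int := if matriz = [] then 0 else ((PySem.List.pyGetD matriz 0 []).length : Int)
  let zeros : List (List Int) := matriz.map (pvZerosRow colunas)
  (PySem.List.enumerate matriz).foldl (fun acc il =>
    (PySem.List.enumerate il.2).foldl (fun acc2 jv =>
      if jv.2 ∈ valor then
        (PySem.List.pyRange (max (il.1 - raio) 0) (min (il.1 + raio) (linhas - 1) + 1) 1).foldl
          (fun acc3 nx =>
            (PySem.List.pyGetD zeros nx []).foldl (fun acc4 ny =>
              if jv.1 - raio ≤ ny ∧ ny ≤ jv.1 + raio ∧ (nx ≠ il.1 ∨ ny ≠ jv.1)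
              then acc4 ++ [(nx, ny)] else acc4) acc3) acc2
      else acc2) acc) []

-- ===== PRECONDITION & SPEC =====
-- Pre_ excludes exactly the inputs on which the Python A raises IndexError: a ragged matrix in which
-- some matching cell has an in-window neighbour column below len(matriz[0]) but beyond its own
-- (shorter) row; on every other input A returns normally.
def Pre_pontos_ao_redor (matriz : List (List Int)) (valor : List Int) (raio : Int) : Prop :=
  ∀ p ∈ PySem.List.enumerate matriz, ∀ q ∈ PySem.List.enumerate p.2, q.2 ∈ valor →
    ∀ w ∈ PySem.List.enumerate matriz, p.1 - raio ≤ w.1 → w.1 ≤ p.1 + raio →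
      ¬ ((w.2.length : Int) ≤ min (q.1 + raio) (((matriz.headD []).length : Int) - 1) ∧
         q.1 - raio ≤ min (q.1 + raio) (((matriz.headD []).length : Int) - 1))
instance (matriz : List (List Int)) (valor : List Int) (raio : Int) : Decidable (Pre_pontos_ao_redor matriz valor raio) := by unfold Pre_pontos_ao_redor; infer_instance

def pvWitness_pontos_ao_redor : List (List Int) × List Int × Int := ([[1, 0], [0, 2]], ([1, 2], 1))

def Spec_pontos_ao_redor (matriz : List (List Int)) (valor : List Int) (raio : Int) (out : List (Int × Int)) : Prop := out = pontos_ao_redor_alt matriz valor raio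
instance (matriz : List (List Int)) (valor : List Int) (raio : Int) (out : List (Int × Int)) : Decidable (Spec_pontos_ao_redor matriz valor raio out) := by unfold Spec_pontos_ao_redor; infer_instance

-- ===== CLAIM (what is proved, stated in full; the proofs are below) =====
def Claim_equal_pontos_ao_redor : Prop := ∀ (matriz : List (List Int)) (valor : List Int) (raio : Int), Dom_pontos_ao_redor matriz valor raio → Pre_pontos_ao_redor matriz valor raio → Spec_pontos_ao_redor matriz valor raio (pontos_ao_redor matriz valor raio)

-- ===== LEMMAS AND PROOFS =====

-- shifting an integer range
theorem pv_pyRange_map_add (c a b : Int) :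
    (PySem.List.pyRange a b 1).map (fun t => c + t) = PySem.List.pyRange (c + a) (c + b) 1 := by
  rw [PySem.List.pyRange_one, PySem.List.pyRange_one, List.map_map]
  have h : c + b - (c + a) = b - a := by ring
  rw [h]
  apply List.map_congr_left
  intro k _
  simp [Function.comp]
  ring

-- clamping: filtering an integer range by bounds is the clamped range
theorem pv_pyRange_filter_bounds (a b c d : Int) :
    (PySem.List.pyRange a b 1).filter (fun t => decide (c ≤ t ∧ t < d)) =
      PySem.List.pyRange (max a c) (min b d) 1 := by
  by_cases h : max a c < min b d
  · rw [PySem.List.pyRange_one_append a (max a c) b (le_max_left _ _) (by omega),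
        PySem.List.pyRange_one_append (max a c) (min b d) b (le_of_lt h) (by omega),
        List.filter_append, List.filter_append]
    have h1 : (PySem.List.pyRange a (max a c) 1).filter (fun t => decide (c ≤ t ∧ t < d)) = [] := by
      rw [List.filter_eq_nil_iff]
      intro t ht
      rw [PySem.List.mem_pyRange_one] at ht
      simp; omega
    have h2 : (PySem.List.pyRange (min b d) b 1).filter (fun t => decide (c ≤ t ∧ t < d)) = [] := by
      rw [List.filter_eq_nil_iff]
      intro t ht
      rw [PySem.List.mem_pyRange_one] at ht
      simp; omega
    have h3 : (PySem.List.pyRange (max a c) (min b d) 1).filter (fun t => decide (c ≤ t ∧ t < d)) =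
        PySem.List.pyRange (max a c) (min b d) 1 := by
      rw [List.filter_eq_self]
      intro t ht
      rw [PySem.List.mem_pyRange_one] at ht
      simp; omega
    rw [h1, h2, h3, List.append_nil, List.nil_append]
  · conv_rhs => rw [PySem.List.pyRange_one_eq_nil (show min b d ≤ max a c by omega)]
    rw [List.filter_eq_nil_iff]
    intro t ht
    rw [PySem.List.mem_pyRange_one] at ht
    simp; omega

-- a comprehension guard as a filter
theorem pv_flatMap_ite {α : Type} (l : List Int) (p : Int → Prop) [DecidablePred p] (h : Int → List α) :
    l.flatMap (fun x => if p x then h x else []) =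
      (l.filter (fun x => decide (p x))).flatMap h := by
  induction l with
  | nil => simp
  | cons x l ih =>
    simp only [List.flatMap_cons, List.filter_cons]
    by_cases hp : p x
    · simp [hp, ih]
    · simp [hp, ih]

-- flatMap respects pointwise equality on members
theorem pv_flatMap_congr {α β : Type} (l : List α) (f g : α → List β)
    (h : ∀ x ∈ l, f x = g x) : l.flatMap f = l.flatMap g := by
  induction l with
  | nil => rfl
  | cons x l ih =>
    simp only [List.flatMap_cons, h x (List.mem_cons_self), ih (fun y hy => h y (List.mem_cons_of_mem x hy))]

-- two strictly increasing integer lists with the same members are equal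
theorem pv_eq_of_pairwise_lt {l₁ l₂ : List Int} (h₁ : l₁.Pairwise (· < ·))
    (h₂ : l₂.Pairwise (· < ·)) (hm : ∀ t, t ∈ l₁ ↔ t ∈ l₂) : l₁ = l₂ := by
  induction l₁ generalizing l₂ with
  | nil =>
    cases l₂ with
    | nil => rfl
    | cons b l₂ => exact absurd ((hm b).2 List.mem_cons_self) (List.not_mem_nil)
  | cons a l₁ ih =>
    cases l₂ with
    | nil => exact absurd ((hm a).1 List.mem_cons_self) (List.not_mem_nil)
    | cons b l₂ =>
      rcases List.pairwise_cons.1 h₁ with ⟨ha, h₁'⟩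
      rcases List.pairwise_cons.1 h₂ with ⟨hb, h₂'⟩
      have hab : a = b := by
        have h1 := (hm a).1 List.mem_cons_self
        have h2 := (hm b).2 List.mem_cons_self
        rcases List.mem_cons.1 h1 with h | h
        · exact h
        · rcases List.mem_cons.1 h2 with h' | h'
          · omega
          · have := ha b h'
            have := hb a h
            omega
      subst hab
      have htail : ∀ t, t ∈ l₁ ↔ t ∈ l₂ := by
        intro t
        constructor
        · intro ht
          have := ha t ht
          rcases List.mem_cons.1 ((hm t).1 (List.mem_cons_of_mem a ht)) with h | h
          · omega
          · exact h
        · intro ht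
          have := hb t ht
          rcases List.mem_cons.1 ((hm t).2 (List.mem_cons_of_mem a ht)) with h | h
          · omega
          · exact h
      rw [ih h₁' h₂' htail]

-- the zero-column index of a row, as a filtered range
theorem pvZerosRow_eq (m : Int) (row : List Int) :
    pvZerosRow m row = (PySem.List.pyRange 0 (row.length : Int) 1).filter
      (fun j => decide (j < m ∧ PySem.List.pyGetD row j 1 = 0)) := by
  unfold pvZerosRow
  rw [PySem.List.enumerate_eq_map_pyRange row 1, List.filter_map, List.map_map]
  simp [Function.comp_def]

-- when the row index is in range, B's indexed zero-list window equals A's bounds-checked zero window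
theorem pv_row (row : List Int) (m r x y nx : Int) :
    (PySem.List.pyRange (max (y - r) 0) (min (y + r) (m - 1) + 1) 1).filter
        (fun ny => decide (¬(nx = x ∧ ny = y)) && decide (PySem.List.pyGetD row ny 1 = 0))
      = (pvZerosRow m row).filter
        (fun ny => decide (y - r ≤ ny ∧ ny ≤ y + r ∧ (nx ≠ x ∨ ny ≠ y))) := by
  rw [pvZerosRow_eq]
  apply pv_eq_of_pairwise_lt
  · exact (PySem.List.pairwise_lt_pyRange_one _ _).filter _
  · exact ((PySem.List.pairwise_lt_pyRange_one _ _).filter _).filter _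
  · intro t
    simp only [List.mem_filter, PySem.List.mem_pyRange_one, Bool.and_eq_true, decide_eq_true_eq]
    constructor
    · rintro ⟨hrange, hne, hz⟩
      have h0t : 0 ≤ t := by omega
      have htlen : t < (row.length : Int) := by
        by_contra hge
        rw [PySem.List.pyGetD_of_nonneg row 1 h0t, List.getD_eq_default row 1 (by omega)] at hz
        exact one_ne_zero hz
      exact ⟨⟨⟨h0t, htlen⟩, by omega, hz⟩, by omega, by omega, by tauto⟩
    · rintro ⟨⟨⟨h0t, htlen⟩, htm, hz⟩, h1, h2, hne⟩
      exact ⟨⟨by omega, by omega⟩, by tauto, hz⟩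

-- clamped-window form of A's per-centre neighbour pass (full window + bounds checks + zero filter)
theorem pv_inner (matriz : List (List Int)) (r n m x y nx : Int) :
    ((PySem.List.pyRange (-r) (r + 1) 1).filter (fun dy =>
        decide (pvCell matriz nx (y + dy) = 0) &&
        decide (0 ≤ nx ∧ nx < n ∧ 0 ≤ y + dy ∧ y + dy < m ∧ (nx ≠ x ∨ y + dy ≠ y)))).map
      (fun dy => (nx, y + dy))
    = if 0 ≤ nx ∧ nx < n then
        ((PySem.List.pyRange (max (y - r) 0) (min (y + r) (m - 1) + 1) 1).filter
          (fun ny => decide (¬(nx = x ∧ ny = y)) && decide (pvCell matriz nx ny = 0))).map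
          (fun ny => (nx, ny))
      else [] := by
  by_cases hb : 0 ≤ nx ∧ nx < n
  · rw [if_pos hb]
    have hcl : PySem.List.pyRange (max (y - r) 0) (min (y + r) (m - 1) + 1) 1 =
        (PySem.List.pyRange (y - r) (y + r + 1) 1).filter (fun t => decide (0 ≤ t ∧ t < m)) := by
      rw [pv_pyRange_filter_bounds]
      congr 1
      omega
    have hsh : PySem.List.pyRange (y - r) (y + r + 1) 1 =
        (PySem.List.pyRange (-r) (r + 1) 1).map (fun t => y + t) := by
      rw [pv_pyRange_map_add]
      congr 1
      ring
    rw [hcl, hsh, List.filter_map, List.filter_map, List.filter_filter, List.map_map]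
    simp only [Function.comp]
    apply congrArg
    apply List.filter_congr
    intro dy _
    simp only [← Bool.decide_and, decide_eq_decide]
    constructor
    · rintro ⟨h1, h2⟩; exact ⟨⟨by tauto, h1⟩, by tauto⟩
    · rintro ⟨⟨h1, h2⟩, h3⟩; exact ⟨h2, by tauto⟩
  · rw [if_neg hb]
    rw [List.map_eq_nil_iff, List.filter_eq_nil_iff]
    intro dy _
    simp only [Bool.and_eq_true, decide_eq_true_eq, not_and]
    intro _
    tauto

-- the per-centre identity: A's full-window bounds-checked neighbours of (x, y), filtered to zeros,
-- are the clamped-row-window walk of B's per-row zero index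
theorem pv_per_center (matriz : List (List Int)) (r m x y : Int) :
    ((PySem.List.pyRange (-r) (r + 1) 1).flatMap (fun dx =>
      ((PySem.List.pyRange (-r) (r + 1) 1).filter (fun dy =>
        decide (0 ≤ x + dx ∧ x + dx < (matriz.length : Int) ∧ 0 ≤ y + dy ∧ y + dy < m ∧
          (x + dx ≠ x ∨ y + dy ≠ y)))).map
        (fun dy => (x + dx, y + dy)))).filter (fun q => decide (pvCell matriz q.1 q.2 = 0))
    = (PySem.List.pyRange (max (x - r) 0) (min (x + r) ((matriz.length : Int) - 1) + 1) 1).flatMap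
        (fun nx =>
        ((PySem.List.pyGetD (matriz.map (pvZerosRow m)) nx []).filter
          (fun ny => decide (y - r ≤ ny ∧ ny ≤ y + r ∧ (nx ≠ x ∨ ny ≠ y)))).map
          (fun ny => (nx, ny))) := by
  rw [List.filter_flatMap]
  have hstep : ∀ dx : Int,
      (((PySem.List.pyRange (-r) (r + 1) 1).filter (fun dy =>
          decide (0 ≤ x + dx ∧ x + dx < (matriz.length : Int) ∧ 0 ≤ y + dy ∧ y + dy < m ∧
            (x + dx ≠ x ∨ y + dy ≠ y)))).map
          (fun dy => (x + dx, y + dy))).filter (fun q => decide (pvCell matriz q.1 q.2 = 0))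
      = if 0 ≤ x + dx ∧ x + dx < (matriz.length : Int) then
          ((PySem.List.pyRange (max (y - r) 0) (min (y + r) (m - 1) + 1) 1).filter
            (fun ny => decide (¬(x + dx = x ∧ ny = y)) && decide (pvCell matriz (x + dx) ny = 0))).map
            (fun ny => (x + dx, ny))
        else [] := by
    intro dx
    rw [List.filter_map, List.filter_filter]
    rw [← pv_inner matriz r (matriz.length : Int) m x y (x + dx)]
    rfl
  simp only [hstep]
  have hsh : PySem.List.pyRange (x - r) (x + r + 1) 1 =
      (PySem.List.pyRange (-r) (r + 1) 1).map (fun t => x + t) := by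
    rw [pv_pyRange_map_add]
    congr 1
    ring
  have hcl : PySem.List.pyRange (max (x - r) 0) (min (x + r) ((matriz.length : Int) - 1) + 1) 1 =
      (PySem.List.pyRange (x - r) (x + r + 1) 1).filter
        (fun t => decide (0 ≤ t ∧ t < (matriz.length : Int))) := by
    rw [pv_pyRange_filter_bounds]
    congr 1
    omega
  conv_rhs => rw [hcl, hsh]
  rw [← pv_flatMap_ite, List.flatMap_map]
  apply pv_flatMap_congr
  intro dx _
  by_cases hb : 0 ≤ x + dx ∧ x + dx < (matriz.length : Int)
  · rw [if_pos hb, if_pos hb]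
    have hrow : PySem.List.pyGetD (matriz.map (pvZerosRow m)) (x + dx) [] =
        pvZerosRow m (PySem.List.pyGetD matriz (x + dx) []) := by
      rw [PySem.List.pyGetD_eq_getElem (matriz.map (pvZerosRow m)) [] hb.1 (by simpa using hb.2),
          PySem.List.pyGetD_eq_getElem matriz [] hb.1 hb.2]
      simp
    rw [hrow, ← pv_row]
    rfl
  · rw [if_neg hb, if_neg hb]

-- 'if p(x): out += g(x)' as a guarded flatMap
theorem pv_foldl_append_ite_list {α β : Type} (l : List α) (p : α → Prop) [DecidablePred p]
    (g : α → List β) (acc : List β) :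
    l.foldl (fun a x => if p x then a ++ g x else a) acc
      = acc ++ l.flatMap (fun x => if p x then g x else []) := by
  induction l generalizing acc with
  | nil => simp
  | cons x l ih => by_cases hp : p x <;> simp [hp, ih]

theorem pv_main (matriz : List (List Int)) (valor : List Int) (raio : Int) :
    pontos_ao_redor matriz valor raio = pontos_ao_redor_alt matriz valor raio := by
  rcases matriz with _ | ⟨row0, rest⟩
  · simp [pontos_ao_redor, pontos_ao_redor_alt, PySem.List.pyRange_one_eq_nil (le_refl (0:Int)),
      PySem.List.enumerate_nil]
  · have hne : row0 :: rest ≠ ([] : List (List Int)) := List.cons_ne_nil _ _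
    unfold pontos_ao_redor pontos_ao_redor_alt
    simp only [PySem.List.foldl_append_ite, PySem.List.foldl_append_eq_flatMap,
      pv_foldl_append_ite_list, List.nil_append, List.map_id', if_neg hne]
    rw [List.filter_flatMap, List.flatMap_assoc]
    have hEo : PySem.List.enumerate (row0 :: rest) =
        (PySem.List.pyRange 0 (PySem.List.len (row0 :: rest)) 1).map
          (fun i => (i, PySem.List.pyGetD (row0 :: rest) i [])) :=
      PySem.List.enumerate_eq_map_pyRange _ []
    have hEi : ∀ xs : List Int, PySem.List.enumerate xs =
        (PySem.List.pyRange 0 (PySem.List.len xs) 1).map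
          (fun j => (j, PySem.List.pyGetD xs j 1)) :=
      fun xs => PySem.List.enumerate_eq_map_pyRange xs 1
    simp only [hEo, hEi, List.flatMap_map, PySem.List.len_eq]
    have hfold : ∀ i j : Int, PySem.List.pyGetD (PySem.List.pyGetD (row0 :: rest) i []) j 1 =
        pvCell (row0 :: rest) i j := fun _ _ => rfl
    simp only [hfold]
    simp only [← pv_flatMap_ite]
    simp only [pv_per_center]

-- ===== VERDICT (by name: the statement is the Claim_ definition above) =====
theorem pontos_ao_redor_spec : Claim_equal_pontos_ao_redor := by
  intro matriz valor raio _ _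
  exact pv_main matriz valor raio
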